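-- pv_equiv track=rewrite | github.com/Sunghwan-DS/TIL | Python/Programmers/2019_KAKAO_hotel.py | solution
-- ===== SOURCE A (Python) =====
-- def solution(k, room_number):
--     dic = {}
--     answer = []
--     for num in room_number:
--         while True:
--             if num in dic:
--                 dic[num] += 1
--                 num += dic[num]
--             else:
--                 dic[num] = 0
--                 answer.append(num)
--                 break
--     return answer
-- ===== SOURCE B (Python) =====
-- def solution(k, room_number):
--     nxt = {}
--
--     def assign(num):
--         # first pass: follow pointers to the first free room
--         r = num
--         while r in nxt:
--             r = nxt[r]
--         # second pass: path compression from num up to the root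
--         x = num
--         while x in nxt:
--             nxt[x], x = r, nxt[x]
--         nxt[r] = r + 1
--         return r
--
--     return [assign(num) for num in room_number]
-- ===== Notes on version B (the rewrite author's own statement) =====
-- stated objective: alternative
-- what changed: Replaced A's growing-increment counter probing with a two-pass union-find style 'next free room' pointer dict: one walk to the root, a second walk compressing the path, and the answer built by a comprehension over the requests.
import Mathlib
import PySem

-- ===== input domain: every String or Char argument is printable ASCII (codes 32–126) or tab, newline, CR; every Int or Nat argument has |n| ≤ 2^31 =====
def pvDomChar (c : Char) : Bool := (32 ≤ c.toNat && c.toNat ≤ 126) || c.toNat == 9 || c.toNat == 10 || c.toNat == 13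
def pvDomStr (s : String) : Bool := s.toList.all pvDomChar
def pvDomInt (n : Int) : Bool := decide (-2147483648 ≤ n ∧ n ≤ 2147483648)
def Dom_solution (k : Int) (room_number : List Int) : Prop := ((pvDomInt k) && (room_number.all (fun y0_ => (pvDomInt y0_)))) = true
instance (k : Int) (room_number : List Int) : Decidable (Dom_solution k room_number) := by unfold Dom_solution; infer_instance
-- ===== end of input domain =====

-- B replaces A's growing-increment counter probing with a two-pass union-find style
-- "next free room" pointer dict (root walk, then a compression walk), answer built by a
-- comprehension (alternative algorithm; no speed claim is made).

-- ===== PORT A =====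
-- A's 'while True' loop; fuel is a totality guard only (room_number.length+1 always
-- suffices: each iteration moves strictly past a distinct existing key), fuel 0 unreachable
def chainA (fuel : Nat) (dic : PySem.Dict Int Int) (num : Int) : PySem.Dict Int Int × Int :=
  match fuel with
  | 0 => (dic, num)
  | f + 1 =>
    match dic.get? num with
    | some d => chainA f (dic.insert num (d + 1)) (num + (d + 1))
    | none => (dic.insert num 0, num)

def solution (k : Int) (room_number : List Int) : List Int :=
  (room_number.foldl
    (fun (st : PySem.Dict Int Int × List Int) num =>
      let r := chainA (room_number.length + 1) st.1 num
      (r.1, st.2 ++ [r.2]))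
    (PySem.Dict.empty, [])).2

-- ===== PORT B =====
-- first while loop of assign: follow pointers to the first free room (fuel = totality guard)
def rootB (fuel : Nat) (nxt : PySem.Dict Int Int) (x : Int) : Int :=
  match fuel with
  | 0 => x
  | f + 1 =>
    match nxt.get? x with
    | some y => rootB f nxt y
    | none => x

-- second while loop of assign: redirect every node on the path to the root r
def compressB (fuel : Nat) (nxt : PySem.Dict Int Int) (x r : Int) : PySem.Dict Int Int :=
  match fuel with
  | 0 => nxt
  | f + 1 =>
    match nxt.get? x with
    | some y => compressB f (nxt.insert x r) y r
    | none => nxt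

-- the comprehension [assign(num) for num in room_number], threading the mutated dict
def goB (fuel : Nat) (nxt : PySem.Dict Int Int) : List Int → List Int
  | [] => []
  | num :: rest =>
    let r := rootB fuel nxt num
    let nxt1 := (compressB fuel nxt num r).insert r (r + 1)
    r :: goB fuel nxt1 rest

def solution_alt (k : Int) (room_number : List Int) : List Int :=
  goB (room_number.length + 1) PySem.Dict.empty room_number

-- ===== PRECONDITION & SPEC =====
def Spec_solution (k : Int) (room_number : List Int) (out : List Int) : Prop := out = solution_alt k room_number
instance (k : Int) (room_number : List Int) (out : List Int) : Decidable (Spec_solution k room_number out) := by unfold Spec_solution; infer_instance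

-- ===== CLAIM (what is proved, stated in full; the proofs are below) =====
def Claim_equal_solution : Prop := ∀ (k : Int) (room_number : List Int), Dom_solution k room_number → Spec_solution k room_number (solution k room_number)

-- ===== LEMMAS AND PROOFS =====

-- A's dict invariant, relaxed at the current probe position `cur`:
-- every key x with value d has d ≥ 0 and rooms x..x+d all occupied (or equal to cur)
def InvA (dic : PySem.Dict Int Int) (cur : Option Int) : Prop :=
  ∀ x d, dic.get? x = some d → 0 ≤ d ∧
    ∀ y, x ≤ y → y ≤ x + d → ((dic.get? y).isSome = true ∨ some y = cur)

-- B's dict invariant: every pointer x ↦ y has x < y and rooms x..y-1 all occupied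
def InvB (nxt : PySem.Dict Int Int) : Prop :=
  ∀ x y, nxt.get? x = some y → x < y ∧
    ∀ z, x ≤ z → z < y → (nxt.get? z).isSome = true

def SameKeys (dic nxt : PySem.Dict Int Int) : Prop :=
  ∀ x, (dic.get? x).isSome = (nxt.get? x).isSome

lemma countP_lt_of_mem {l : List Int} {p q : Int → Bool} {a : Int}
    (ha : a ∈ l) (hpa : p a = false) (hqa : q a = true)
    (hmono : ∀ x, p x = true → q x = true) :
    l.countP p < l.countP q := by
  induction l with
  | nil => cases ha
  | cons b t ih =>
    rcases List.mem_cons.mp ha with rfl | hat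
    · have : t.countP p ≤ t.countP q := List.countP_mono_left (fun x _ hx => hmono x hx)
      simp [hpa, hqa]
      omega
    · have := ih hat
      have hb : (if p b = true then 1 else 0) ≤ (if q b = true then 1 else 0) := by
        by_cases h : p b = true
        · simp [h, hmono b h]
        · simp [h]
      simp only [List.countP_cons]
      omega

lemma countGe_lt {d : PySem.Dict Int Int} {num num' : Int}
    (h : num < num') (hk : (d.get? num).isSome = true) :
    d.keys.countP (fun x => decide (num' ≤ x)) < d.keys.countP (fun x => decide (num ≤ x)) := by
  apply countP_lt_of_mem (a := num)
  · have : d.contains num = true := by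
      rw [PySem.Dict.contains_eq_isSome_get?]; exact hk
    exact (PySem.Dict.contains_iff_mem_keys _ _).mp this
  · simp; omega
  · simp
  · intro x hx; simp at hx ⊢; omega

lemma countGe_le_length (d : PySem.Dict Int Int) (num : Int) :
    d.keys.countP (fun x => decide (num ≤ x)) ≤ d.keys.length :=
  List.countP_le_length

-- occupied set is unchanged by overwriting an existing key
lemma isSome_insert_of_mem {d : PySem.Dict Int Int} {num v : Int}
    (h : (d.get? num).isSome = true) (x : Int) :
    ((d.insert num v).get? x).isSome = (d.get? x).isSome := by
  rw [PySem.Dict.get?_insert]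
  split
  · next he => subst he; simp [h]
  · rfl

-- Specification of A's inner while loop
lemma chainA_spec : ∀ (fuel : Nat) (dic : PySem.Dict Int Int) (num : Int),
    InvA dic (some num) →
    dic.keys.countP (fun x => decide (num ≤ x)) < fuel →
    num ≤ (chainA fuel dic num).2 ∧
    dic.get? (chainA fuel dic num).2 = none ∧
    (∀ m, num ≤ m → m < (chainA fuel dic num).2 → (dic.get? m).isSome = true) ∧
    (∀ x, (((chainA fuel dic num).1).get? x).isSome
        = ((dic.get? x).isSome || decide (x = (chainA fuel dic num).2))) ∧
    InvA (chainA fuel dic num).1 none ∧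
    ((chainA fuel dic num).1).keys.length = dic.keys.length + 1 := by
  intro fuel
  induction fuel with
  | zero => intro dic num _ hf; omega
  | succ f ih =>
    intro dic num hInv hf
    by_cases hmem : (dic.get? num).isSome = true
    · obtain ⟨d, hd⟩ := Option.isSome_iff_exists.mp hmem
      have hstep : chainA (f + 1) dic num = chainA f (dic.insert num (d + 1)) (num + (d + 1)) := by
        simp [chainA, hd]
      obtain ⟨hd0, hrange⟩ := hInv num d hd
      set dic1 := dic.insert num (d + 1) with hdic1
      set num' := num + (d + 1) with hnum'
      have hkeys1 : dic1.keys = dic.keys := by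
        apply PySem.Dict.keys_insert_of_contains _ _ ?_
        rw [PySem.Dict.contains_eq_isSome_get?]; exact hmem
      have hsome1 : ∀ x, (dic1.get? x).isSome = (dic.get? x).isSome :=
        isSome_insert_of_mem hmem
      have hInv1 : InvA dic1 (some num') := by
        intro x dx hx
        by_cases hxnum : x = num
        · subst hxnum
          rw [hdic1, PySem.Dict.get?_insert_self] at hx
          injection hx with hx; subst hx
          refine ⟨by omega, ?_⟩
          intro y hy1 hy2
          by_cases hynum' : y = num'
          · right; rw [hynum']
          · left
            rw [hsome1 y]
            rcases hrange y hy1 (by omega) with h | h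
            · exact h
            · injection h with h; subst h; exact hmem
        · rw [hdic1, PySem.Dict.get?_insert_of_ne _ _ hxnum] at hx
          obtain ⟨hdx0, hr⟩ := hInv x dx hx
          refine ⟨hdx0, ?_⟩
          intro y hy1 hy2
          left
          rw [hsome1 y]
          rcases hr y hy1 hy2 with h | h
          · exact h
          · injection h with h; subst h; exact hmem
      have hfuel1 : dic1.keys.countP (fun x => decide (num' ≤ x)) < f := by
        have := countGe_lt (d := dic) (num := num) (num' := num') (by omega) hmem
        rw [hkeys1]; omega
      obtain ⟨h1, h2, h3, h4, h5, h6⟩ := ih dic1 num' hInv1 hfuel1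
      rw [hstep]
      refine ⟨by omega, ?_, ?_, ?_, h5, by rw [h6, hkeys1]⟩
      · have := h2
        have : (dic.get? (chainA f dic1 num').2).isSome = false := by
          rw [← hsome1]; simp [h2]
        simpa [Option.isSome_eq_false_iff, Option.isNone_iff_eq_none] using this
      · intro m hm1 hm2
        by_cases hcase : num' ≤ m
        · rw [← hsome1 m]; exact h3 m hcase hm2
        · rcases hrange m hm1 (by omega) with h | h
          · exact h
          · injection h with h; subst h; exact hmem
      · intro x
        rw [h4 x, hsome1 x]
    · have hd : dic.get? num = none := by
        simpa [Option.isSome_eq_false_iff, Option.isNone_iff_eq_none] using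
          (by simpa using hmem : (dic.get? num).isSome = false)
      have hstep : chainA (f + 1) dic num = (dic.insert num 0, num) := by
        simp [chainA, hd]
      rw [hstep]
      have hnc : dic.contains num = false := by
        rw [PySem.Dict.contains_eq_isSome_get?, hd]; rfl
      refine ⟨le_refl _, hd, by intro m h1 h2; omega, ?_, ?_, ?_⟩
      · intro x
        rw [PySem.Dict.get?_insert]
        split
        · next he => subst he; simp [hd]
        · next he => simp [he]
      · intro x dx hx
        by_cases hxnum : x = num
        · subst hxnum
          rw [PySem.Dict.get?_insert_self] at hx
          injection hx with hx; subst hx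
          refine ⟨le_refl _, ?_⟩
          intro y hy1 hy2
          have : y = x := by omega
          subst this
          left; rw [PySem.Dict.get?_insert_self]; rfl
        · rw [PySem.Dict.get?_insert_of_ne _ _ hxnum] at hx
          obtain ⟨hdx0, hr⟩ := hInv x dx hx
          refine ⟨hdx0, ?_⟩
          intro y hy1 hy2
          left
          rcases hr y hy1 hy2 with h | h
          · rw [PySem.Dict.get?_insert]
            split
            · rfl
            · exact h
          · injection h with h; subst h
            rw [PySem.Dict.get?_insert_self]; rfl
      · rw [PySem.Dict.keys_insert_of_not_contains _ _ hnc]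
        simp

-- Specification of B's root-finding walk
lemma rootB_spec : ∀ (fuel : Nat) (nxt : PySem.Dict Int Int) (x : Int),
    InvB nxt →
    nxt.keys.countP (fun t => decide (x ≤ t)) < fuel →
    x ≤ rootB fuel nxt x ∧
    nxt.get? (rootB fuel nxt x) = none ∧
    (∀ m, x ≤ m → m < rootB fuel nxt x → (nxt.get? m).isSome = true) := by
  intro fuel
  induction fuel with
  | zero => intro nxt x _ hf; omega
  | succ f ih =>
    intro nxt x hInv hf
    by_cases hmem : (nxt.get? x).isSome = true
    · obtain ⟨y, hy⟩ := Option.isSome_iff_exists.mp hmem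
      have hstep : rootB (f + 1) nxt x = rootB f nxt y := by
        simp [rootB, hy]
      obtain ⟨hxy, hrange⟩ := hInv x y hy
      have hfuel1 : nxt.keys.countP (fun t => decide (y ≤ t)) < f := by
        have := countGe_lt (d := nxt) (num := x) (num' := y) hxy hmem
        omega
      obtain ⟨h1, h2, h3⟩ := ih nxt y hInv hfuel1
      rw [hstep]
      refine ⟨by omega, h2, ?_⟩
      intro m hm1 hm2
      by_cases hcase : y ≤ m
      · exact h3 m hcase hm2
      · exact hrange m hm1 (by omega)
    · have hd : nxt.get? x = none := by
        simpa [Option.isSome_eq_false_iff, Option.isNone_iff_eq_none] using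
          (by simpa using hmem : (nxt.get? x).isSome = false)
      have hstep : rootB (f + 1) nxt x = x := by
        simp [rootB, hd]
      rw [hstep]
      exact ⟨le_refl _, hd, by intro m h1 h2; omega⟩

-- Specification of B's compression walk: it preserves the invariant, the occupied set
-- and the key list, given that r is the first free room at or above x
lemma compressB_spec : ∀ (fuel : Nat) (d : PySem.Dict Int Int) (x r : Int),
    InvB d →
    x ≤ r →
    (∀ m, x ≤ m → m < r → (d.get? m).isSome = true) →
    d.get? r = none →
    d.keys.countP (fun t => decide (x ≤ t)) < fuel →
    InvB (compressB fuel d x r) ∧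
    (∀ z, ((compressB fuel d x r).get? z).isSome = (d.get? z).isSome) ∧
    (compressB fuel d x r).keys = d.keys := by
  intro fuel
  induction fuel with
  | zero => intro d x r _ _ _ _ hf; omega
  | succ f ih =>
    intro d x r hInv hxr hocc hr hf
    by_cases hmem : (d.get? x).isSome = true
    · obtain ⟨y, hy⟩ := Option.isSome_iff_exists.mp hmem
      have hstep : compressB (f + 1) d x r = compressB f (d.insert x r) y r := by
        simp [compressB, hy]
      obtain ⟨hxy, hrange⟩ := hInv x y hy
      have hxner : x ≠ r := by
        intro h; subst h; rw [hy] at hr; cases hr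
      have hxr' : x < r := lt_of_le_of_ne hxr hxner
      set d1 := d.insert x r with hd1
      have hsome1 : ∀ z, (d1.get? z).isSome = (d.get? z).isSome :=
        isSome_insert_of_mem hmem
      have hkeys1 : d1.keys = d.keys := by
        apply PySem.Dict.keys_insert_of_contains _ _ ?_
        rw [PySem.Dict.contains_eq_isSome_get?]; exact hmem
      -- y ≤ r: otherwise r ∈ [x, y) would be occupied
      have hyr : y ≤ r := by
        by_contra h
        have := hrange r hxr (by omega)
        rw [hr] at this; cases this
      have hInv1 : InvB d1 := by
        intro p q hpq
        by_cases hpx : p = x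
        · subst hpx
          rw [hd1, PySem.Dict.get?_insert_self] at hpq
          injection hpq with hpq; subst hpq
          refine ⟨hxr', ?_⟩
          intro z h1 h2
          rw [hsome1 z]
          exact hocc z h1 h2
        · rw [hd1, PySem.Dict.get?_insert_of_ne _ _ hpx] at hpq
          obtain ⟨h1, h2⟩ := hInv p q hpq
          refine ⟨h1, ?_⟩
          intro z hz1 hz2
          rw [hsome1 z]
          exact h2 z hz1 hz2
      have hocc1 : ∀ m, y ≤ m → m < r → (d1.get? m).isSome = true := by
        intro m h1 h2
        rw [hsome1 m]
        exact hocc m (by omega) h2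
      have hr1 : d1.get? r = none := by
        rw [hd1, PySem.Dict.get?_insert_of_ne _ _ (by omega : r ≠ x)]
        exact hr
      have hfuel1 : d1.keys.countP (fun t => decide (y ≤ t)) < f := by
        have := countGe_lt (d := d) (num := x) (num' := y) hxy hmem
        rw [hkeys1]; omega
      obtain ⟨h1, h2, h3⟩ := ih d1 y r hInv1 hyr hocc1 hr1 hfuel1
      rw [hstep]
      refine ⟨h1, ?_, by rw [h3, hkeys1]⟩
      intro z
      rw [h2 z, hsome1 z]
    · have hd : d.get? x = none := by
        simpa [Option.isSome_eq_false_iff, Option.isNone_iff_eq_none] using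
          (by simpa using hmem : (d.get? x).isSome = false)
      have hstep : compressB (f + 1) d x r = d := by
        simp [compressB, hd]
      rw [hstep]
      exact ⟨hInv, fun z => rfl, rfl⟩

-- uniqueness: both loops return the first unoccupied room ≥ num
lemma firstFree_unique {num rA rB : Int}
    (occ : Int → Bool)
    (hA1 : num ≤ rA) (hA2 : occ rA = false) (hA3 : ∀ m, num ≤ m → m < rA → occ m = true)
    (hB1 : num ≤ rB) (hB2 : occ rB = false) (hB3 : ∀ m, num ≤ m → m < rB → occ m = true) :
    rA = rB := by
  rcases lt_trichotomy rA rB with h | h | h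
  · have := hB3 rA hA1 h; rw [hA2] at this; cases this
  · exact h
  · have := hA3 rB hB1 h; rw [hB2] at this; cases this

-- the main simulation: A's fold and B's recursion yield the same answers from related states
lemma main_sim : ∀ (l : List Int) (F : Nat) (dicA nxtB : PySem.Dict Int Int) (ans : List Int),
    InvA dicA none → InvB nxtB → SameKeys dicA nxtB →
    dicA.keys.length + l.length ≤ F →
    nxtB.keys.length + l.length ≤ F →
    (l.foldl (fun (st : PySem.Dict Int Int × List Int) num =>
        let r := chainA (F + 1) st.1 num
        (r.1, st.2 ++ [r.2])) (dicA, ans)).2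
    = ans ++ goB (F + 1) nxtB l := by
  intro l
  induction l with
  | nil => intro F dicA nxtB ans _ _ _ _ _; simp [goB]
  | cons num t ih =>
    intro F dicA nxtB ans hIA hIB hSK hlenA hlenB
    simp only [List.foldl_cons, List.length_cons] at *
    -- A side step
    have hIA' : InvA dicA (some num) := by
      intro x d hx
      obtain ⟨h0, hr⟩ := hIA x d hx
      exact ⟨h0, fun y h1 h2 => (hr y h1 h2).imp id (fun h => by cases h)⟩
    have hfA : dicA.keys.countP (fun x => decide (num ≤ x)) < F + 1 := by
      have := countGe_le_length dicA num; omega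
    obtain ⟨hA1, hA2, hA3, hA4, hA5, hA6⟩ := chainA_spec (F + 1) dicA num hIA' hfA
    set rA := (chainA (F + 1) dicA num).2 with hrA
    set dicA' := (chainA (F + 1) dicA num).1 with hdicA'
    -- B side step
    have hfB : nxtB.keys.countP (fun t => decide (num ≤ t)) < F + 1 := by
      have := countGe_le_length nxtB num; omega
    obtain ⟨hB1, hB2, hB3⟩ := rootB_spec (F + 1) nxtB num hIB hfB
    set rB := rootB (F + 1) nxtB num with hrB
    -- the two results agree
    have hreq : rA = rB := by
      apply firstFree_unique (occ := fun m => (dicA.get? m).isSome)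
      · exact hA1
      · simp [hA2]
      · exact hA3
      · exact hB1
      · rw [hSK rB]; simp [hB2]
      · intro m h1 h2; rw [hSK m]; exact hB3 m h1 h2
    obtain ⟨hC1, hC2, hC3⟩ := compressB_spec (F + 1) nxtB num rB hIB hB1 hB3 hB2 hfB
    set nxtC := compressB (F + 1) nxtB num rB with hnxtC
    set nxtB' := nxtC.insert rB (rB + 1) with hnxtB'
    have hCr : nxtC.get? rB = none := by
      have := hC2 rB
      rw [hB2] at this
      simpa [Option.isSome_eq_false_iff, Option.isNone_iff_eq_none] using this
    have hgetB' : ∀ x, nxtB'.get? x = if x = rB then some (rB + 1) else nxtC.get? x := by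
      intro x; rw [hnxtB', PySem.Dict.get?_insert]
    have hoccB' : ∀ x, (nxtB'.get? x).isSome = ((nxtB.get? x).isSome || decide (x = rB)) := by
      intro x
      rw [hgetB']
      by_cases hx : x = rB
      · simp [hx]
      · simp [hx, hC2 x]
    have hIB' : InvB nxtB' := by
      intro x y hxy
      rw [hgetB'] at hxy
      by_cases hx : x = rB
      · subst hx
        rw [if_pos rfl] at hxy
        injection hxy with hxy
        refine ⟨by omega, ?_⟩
        intro z h1 h2
        have hz : z = rB := by omega
        subst hz
        rw [hoccB']; simp
      · rw [if_neg hx] at hxy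
        obtain ⟨h1, h2⟩ := hC1 x y hxy
        refine ⟨h1, ?_⟩
        intro z hz1 hz2
        rw [hoccB', ← hC2 z, h2 z hz1 hz2]
        simp
    have hSK' : SameKeys dicA' nxtB' := by
      intro x
      rw [hA4 x, hoccB', hSK x, hreq]
    have hkeysB' : nxtB'.keys.length = nxtB.keys.length + 1 := by
      have hnc : nxtC.contains rB = false := by
        rw [PySem.Dict.contains_eq_isSome_get?, hCr]; rfl
      rw [hnxtB', PySem.Dict.keys_insert_of_not_contains _ _ hnc]
      simp [hC3]
    have hgo : goB (F + 1) nxtB (num :: t) = rB :: goB (F + 1) nxtB' t := by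
      simp only [goB]
      rfl
    rw [hgo, hreq]
    have := ih F dicA' nxtB' (ans ++ [rB]) hA5 hIB' hSK' (by omega) (by omega)
    rw [this]
    simp

-- ===== VERDICT (by name: the statement is the Claim_ definition above) =====
theorem solution_spec : Claim_equal_solution := by
  intro k room_number _
  unfold Spec_solution solution solution_alt
  have := main_sim room_number room_number.length PySem.Dict.empty PySem.Dict.empty []
    (by intro x d hx; rw [PySem.Dict.get?_empty] at hx; cases hx)
    (by intro x y hx; rw [PySem.Dict.get?_empty] at hx; cases hx)
    (by intro x; rfl)
    (by simp [PySem.Dict.keys_empty])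
    (by simp [PySem.Dict.keys_empty])
  simpa using this
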